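-- pv_equiv track=rewrite | github.com/Oblo-cit-sci/Oblo-backend | app/app/services/entry_export.py | join_list
-- ===== SOURCE A (Python) =====
-- from typing import List, Dict, Union, Iterable
--
-- def join_list(
--     list_result: List[Dict], seperator: str
-- ) -> Dict[str, Union[str, int, float]]:
--     result = {}
--     for d in list_result:
--         for k, v in d.items():
--             result.setdefault(k, []).append(str(v))
--     for k, v in result.items():
--         result[k] = seperator.join(v)
--     return result
-- ===== SOURCE B (Python) =====
-- def join_list(list_result, seperator):
--     result_keys = list(dict.fromkeys(k for d in list_result for k in d))
--     return {
--         k: seperator.join(str(v) for d in list_result for kk, v in d.items() if kk == k)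
--         for k in result_keys
--     }
-- ===== Notes on version B (the rewrite author's own statement) =====
-- stated objective: simpler
-- what changed: Replaces the grouping accumulator dict plus a second rewrite-in-place pass by computing the first-appearance-ordered distinct keys once (dict.fromkeys) and then building the output directly with a per-key re-scan of all dicts.
import Mathlib
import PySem

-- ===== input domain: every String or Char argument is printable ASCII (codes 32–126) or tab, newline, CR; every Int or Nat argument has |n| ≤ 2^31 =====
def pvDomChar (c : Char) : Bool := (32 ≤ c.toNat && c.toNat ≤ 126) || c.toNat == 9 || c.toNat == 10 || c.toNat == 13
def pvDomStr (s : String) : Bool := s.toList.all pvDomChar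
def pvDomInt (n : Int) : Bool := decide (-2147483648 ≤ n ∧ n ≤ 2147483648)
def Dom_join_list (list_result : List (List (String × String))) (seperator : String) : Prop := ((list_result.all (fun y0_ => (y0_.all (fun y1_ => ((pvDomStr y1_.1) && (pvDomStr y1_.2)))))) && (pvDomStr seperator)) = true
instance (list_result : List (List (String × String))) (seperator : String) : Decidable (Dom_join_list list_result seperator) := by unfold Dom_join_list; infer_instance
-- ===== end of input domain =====

-- B computes the first-appearance-ordered distinct keys once and builds the output
-- with a per-key re-scan, instead of A's grouping-dict accumulation plus rewrite pass (objective: simpler).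
-- ===== PORT A =====
-- A: accumulate values per key into a dict of lists (result.setdefault(k, []).append(str(v)),
-- i.e. result[k] = result.get(k, []) + [v] -> Dict.modify), then rewrite each entry in place
-- with seperator.join (every key present, so the items list is mapped entry by entry in order).
-- str(v) = v: the values are strings under the type convention.
def join_list (list_result : List (List (String × String))) (seperator : String) : List (String × String) :=
  let result : PySem.Dict String (List String) :=
    list_result.foldl (fun result d =>
      d.foldl (fun result kv =>
        result.modify kv.1 [] (fun vs => vs ++ [kv.2])) result)
      PySem.Dict.empty
  result.items.map (fun kv => (kv.1, PySem.Str.join seperator kv.2))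

-- ===== PORT B =====
-- B: result_keys = list(dict.fromkeys(...)) is PySem.List.dedup; then for each key,
-- gather the matching values by scanning all dicts in order and join them.
def join_list_alt (list_result : List (List (String × String))) (seperator : String) : List (String × String) :=
  let result_keys := PySem.List.dedup (list_result.flatMap (fun d => d.map Prod.fst))
  result_keys.map (fun k =>
    (k, PySem.Str.join seperator
          (((list_result.flatMap id).filter (fun kv => kv.1 == k)).map Prod.snd)))

-- ===== PRECONDITION & SPEC =====
def Spec_join_list (list_result : List (List (String × String))) (seperator : String) (out : List (String × String)) : Prop := out = join_list_alt list_result seperator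
instance (list_result : List (List (String × String))) (seperator : String) (out : List (String × String)) : Decidable (Spec_join_list list_result seperator out) := by unfold Spec_join_list; infer_instance

-- ===== CLAIM (what is proved, stated in full; the proofs are below) =====
def Claim_equal_join_list : Prop := ∀ (list_result : List (List (String × String))) (seperator : String), Dom_join_list list_result seperator → Spec_join_list list_result seperator (join_list list_result seperator)

-- ===== LEMMAS AND PROOFS =====
def pvVals (ps : List (String × String)) (k : String) : List String :=
  (ps.filter (fun kv => kv.1 == k)).map Prod.snd

def pvCanon (ps : List (String × String)) : PySem.Dict String (List String) :=
  ⟨(PySem.List.dedup (ps.map Prod.fst)).map (fun k => (k, pvVals ps k))⟩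

theorem pvAny_beq (l : List String) (k : String) :
    (l.any (fun j => j == k)) = decide (k ∈ l) := by
  induction l with
  | nil => simp
  | cons a l ih => by_cases h : a = k <;> simp [h, ih, eq_comm (a := k)]

theorem pvFind?_map (K : List String) (g : String → List String) (k : String) :
    List.find? (fun p => p.1 == k) (K.map (fun j => (j, g j)))
      = if k ∈ K then some (k, g k) else none := by
  induction K with
  | nil => simp
  | cons a K ih =>
      by_cases h : a = k
      · simp [h]
      · have h' : ¬ k = a := fun hc => h hc.symm
        simp [h, h', ih]

theorem pvVals_nil (ps : List (String × String)) (k : String)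
    (h : k ∉ ps.map Prod.fst) : pvVals ps k = [] := by
  rw [pvVals, List.filter_eq_nil_iff.2, List.map_nil]
  intro kv hkv hb
  exact h (List.mem_map.2 ⟨kv, hkv, by simpa using hb⟩)

theorem pvCanon_getD (ps : List (String × String)) (k : String) :
    (pvCanon ps).getD k [] = pvVals ps k := by
  rw [PySem.Dict.getD, PySem.Dict.get?]
  show (Option.map _ (List.find? _ ((PySem.List.dedup (ps.map Prod.fst)).map (fun j => (j, pvVals ps j))))).getD [] = _
  rw [pvFind?_map]
  by_cases h : k ∈ ps.map Prod.fst
  · rw [if_pos ((PySem.List.mem_dedup _ _).2 h)]; rfl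
  · rw [if_neg (fun hc => h ((PySem.List.mem_dedup _ _).1 hc)), Option.map_none,
      Option.getD_none, pvVals_nil ps k h]

theorem pvCanon_contains (ps : List (String × String)) (k : String) :
    (pvCanon ps).contains k = decide (k ∈ ps.map Prod.fst) := by
  rw [PySem.Dict.contains]
  show ((PySem.List.dedup (ps.map Prod.fst)).map (fun j => (j, pvVals ps j))).any (fun p => p.1 == k) = _
  rw [List.any_map]
  show (PySem.List.dedup (ps.map Prod.fst)).any (fun j => j == k) = _
  rw [pvAny_beq]
  simp only [decide_eq_decide]
  exact PySem.List.mem_dedup _ _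

theorem pvCanon_step (ps : List (String × String)) (k v : String) :
    (pvCanon ps).modify k [] (fun vs => vs ++ [v]) = pvCanon (ps ++ [(k, v)]) := by
  have hvals : ∀ j, pvVals (ps ++ [(k, v)]) j = pvVals ps j ++ if j = k then [v] else [] := by
    intro j
    by_cases hjk : j = k
    · simp [pvVals, List.filter_append, hjk]
    · have hkj : ¬ k = j := fun hc => hjk hc.symm
      simp [pvVals, List.filter_append, hjk, hkj]
  have hded : PySem.List.dedup ((ps ++ [(k, v)]).map Prod.fst)
      = if k ∈ ps.map Prod.fst then PySem.List.dedup (ps.map Prod.fst)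
        else PySem.List.dedup (ps.map Prod.fst) ++ [k] := by
    rw [List.map_append]
    show PySem.Set.ofList (ps.map Prod.fst ++ [k]) = _
    rw [PySem.Set.ofList, List.foldl_append, List.foldl_cons, List.foldl_nil]
    show PySem.Set.add (PySem.List.dedup (ps.map Prod.fst)) k = _
    rw [PySem.Set.add, PySem.Set.contains_eq_decide]
    by_cases h : k ∈ ps.map Prod.fst
    · rw [decide_eq_true ((PySem.List.mem_dedup _ _).2 h), if_pos rfl, if_pos h]
    · rw [decide_eq_false (fun hc => h ((PySem.List.mem_dedup _ _).1 hc))]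
      simp [h]
  rw [PySem.Dict.modify, PySem.Dict.insert, pvCanon_getD, pvCanon_contains]
  by_cases h : k ∈ ps.map Prod.fst
  · rw [decide_eq_true h, if_pos rfl]
    apply congrArg PySem.Dict.mk
    show ((PySem.List.dedup (ps.map Prod.fst)).map (fun j => (j, pvVals ps j))).map _ = _
    rw [List.map_map]
    rw [hded, if_pos h]
    refine List.map_congr_left (fun j _ => ?_)
    by_cases hjk : j = k <;> simp [hjk, hvals]
  · rw [decide_eq_false h]
    simp only [Bool.false_eq_true, if_false]
    apply congrArg PySem.Dict.mk
    show (PySem.List.dedup (ps.map Prod.fst)).map (fun j => (j, pvVals ps j)) ++ [(k, pvVals ps k ++ [v])] = _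
    rw [hded, if_neg h, List.map_append, List.map_cons, List.map_nil]
    congr 1
    · refine List.map_congr_left (fun j hj => ?_)
      have hjk : j ≠ k := fun hc => h (hc ▸ (PySem.List.mem_dedup _ _).1 hj)
      simp [hvals, hjk]
    · simp [hvals, pvVals_nil ps k h]

theorem pvFold_eq_canon (ps : List (String × String)) :
    ps.foldl (fun result kv => result.modify kv.1 [] (fun vs => vs ++ [kv.2]))
      PySem.Dict.empty = pvCanon ps := by
  induction ps using List.reverseRecOn with
  | nil => rfl
  | append_singleton ps kv ih =>
      rw [List.foldl_append, List.foldl_cons, List.foldl_nil, ih, pvCanon_step]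

-- ===== VERDICT (by name: the statement is the Claim_ definition above) =====
theorem join_list_spec : Claim_equal_join_list := by
  intro list_result seperator _
  show join_list list_result seperator = join_list_alt list_result seperator
  show ((list_result.foldl (fun result d =>
      d.foldl (fun result kv => result.modify kv.1 [] (fun vs => vs ++ [kv.2])) result)
      PySem.Dict.empty).items.map (fun kv => (kv.1, PySem.Str.join seperator kv.2))) = _
  have hA : list_result.foldl (fun result d =>
      d.foldl (fun result kv => result.modify kv.1 [] (fun vs => vs ++ [kv.2])) result)
      PySem.Dict.empty
      = (list_result.flatMap id).foldl
          (fun result kv => result.modify kv.1 [] (fun vs => vs ++ [kv.2])) PySem.Dict.empty :=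
    (List.foldl_flatMap).symm
  rw [hA, pvFold_eq_canon]
  show ((PySem.List.dedup ((list_result.flatMap id).map Prod.fst)).map (fun k => (k, pvVals (list_result.flatMap id) k))).map (fun kv => (kv.1, PySem.Str.join seperator kv.2)) = _
  rw [List.map_map]
  show _ = (PySem.List.dedup (list_result.flatMap (fun d => d.map Prod.fst))).map _
  rw [show list_result.flatMap (fun d => d.map Prod.fst) = (list_result.flatMap id).map Prod.fst by
    rw [List.map_flatMap]; rfl]
  exact List.map_congr_left (fun j _ => rfl)
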